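-- pv_equiv track=rewrite | github.com/DJJones66/braindrive-concepts-lab | concepts/Concept-5/braindrive_runtime/nodes/scrapling.py | _clean_relative_parts
-- ===== SOURCE A (Python) =====
-- from typing import Any, Dict, Iterable, List, Mapping, Optional
--
-- def _clean_relative_parts(raw_path: str) -> List[str]:
--     token = str(raw_path).strip().replace("\\", "/")
--     if not token:
--         return []
--     if token.startswith("/"):
--         raise ValueError("save_directory must be relative to library root")
--     out: List[str] = []
--     for piece in token.split("/"):
--         part = piece.strip()
--         if not part or part == ".":
--             continue
--         if part == "..":
--             raise ValueError("save_directory cannot contain '..'")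
--         out.append(part)
--     return out
-- ===== SOURCE B (Python) =====
-- from typing import List
--
-- def _clean_relative_parts(raw_path: str) -> List[str]:
--     token = str(raw_path).strip().replace("\\", "/")
--     if not token:
--         return []
--     if token.startswith("/"):
--         raise ValueError("save_directory must be relative to library root")
--     out: List[str] = []
--     seg: List[str] = []
--     for ch in token + "/":
--         if ch == "/":
--             part = "".join(seg).strip()
--             seg = []
--             if part == "..":
--                 raise ValueError("save_directory cannot contain '..'")
--             if part and part != ".":
--                 out.append(part)
--         else:
--             seg.append(ch)
--     return out
-- ===== Notes on version B (the rewrite author's own statement) =====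
-- stated objective: alternative
-- what changed: Replaces A's split('/')-then-loop-over-pieces with a single character-level scanner that never calls split: it walks token+'/' once, accumulating the current segment char by char and flushing (strip, validate '..', filter empty/'.') at each '/' boundary.
import Mathlib
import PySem

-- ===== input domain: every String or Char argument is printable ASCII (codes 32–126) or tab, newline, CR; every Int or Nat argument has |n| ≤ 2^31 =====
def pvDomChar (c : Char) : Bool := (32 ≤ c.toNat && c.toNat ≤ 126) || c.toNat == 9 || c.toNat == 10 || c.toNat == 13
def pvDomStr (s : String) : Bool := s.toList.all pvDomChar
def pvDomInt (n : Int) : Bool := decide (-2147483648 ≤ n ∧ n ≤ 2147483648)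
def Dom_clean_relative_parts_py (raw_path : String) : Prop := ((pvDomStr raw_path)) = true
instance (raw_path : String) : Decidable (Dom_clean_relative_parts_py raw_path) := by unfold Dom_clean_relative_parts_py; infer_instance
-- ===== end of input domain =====

-- B keeps A's preamble but replaces split('/') + piece loop by a single character-level
-- scanner over token+'/' flushing segments at '/' boundaries; same cost, different algorithm.

-- ===== PORT A =====
-- Literal transliteration of A. The two Python `raise ValueError` sites return [] here;
-- exactly those inputs are excluded by Pre_clean_relative_parts_py.
def clean_relative_parts_py (raw_path : String) : List String :=
  let token := PySem.Str.strip (PySem.Str.replace raw_path "\\" "/")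
  if token = "" then []
  else if PySem.Str.startswith token "/" then []  -- raise ValueError (excluded by Pre_)
  else
    ((PySem.Str.split? token "/").getD []).foldl
      (fun out piece =>
        let part := PySem.Str.strip piece
        if part = "" ∨ part = "." then out
        else if part = ".." then out  -- raise ValueError (excluded by Pre_)
        else out ++ [part]) []

-- ===== PORT B =====
-- Transliteration of B: a char-level scan of token+'/' with state (out, current segment).
def clean_relative_parts_py_alt (raw_path : String) : List String :=
  let token := PySem.Str.strip (PySem.Str.replace raw_path "\\" "/")
  if token = "" then []
  else if PySem.Str.startswith token "/" then []  -- raise ValueError (excluded by Pre_)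
  else
    ((token.toList ++ ['/']).foldl
      (fun (st : List String × List Char) ch =>
        if ch = '/' then
          let part := PySem.Chars.strip st.2
          if part = ['.', '.'] then (st.1, [])  -- raise ValueError (excluded by Pre_)
          else if part ≠ [] ∧ part ≠ ['.'] then (st.1 ++ [String.ofList part], [])
          else (st.1, [])
        else (st.1, st.2 ++ [ch])) ([], [])).1

-- ===== PRECONDITION & SPEC =====
-- Pre_ excludes exactly the inputs on which Python A raises ValueError: a cleaned token
-- that starts with '/' or contains a stripped piece equal to '..'.
def Pre_clean_relative_parts_py (raw_path : String) : Prop :=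
  let token := PySem.Str.strip (PySem.Str.replace raw_path "\\" "/")
  token = "" ∨
    (PySem.Str.startswith token "/" = false ∧
      ∀ piece ∈ (PySem.Str.split? token "/").getD [], PySem.Str.strip piece ≠ "..")
instance (raw_path : String) : Decidable (Pre_clean_relative_parts_py raw_path) := by
  unfold Pre_clean_relative_parts_py; infer_instance

def pvWitness_clean_relative_parts_py : String := " a\\b/./ c  /d "

def Spec_clean_relative_parts_py (raw_path : String) (out : List String) : Prop :=
  out = clean_relative_parts_py_alt raw_path
instance (raw_path : String) (out : List String) : Decidable (Spec_clean_relative_parts_py raw_path out) := by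
  unfold Spec_clean_relative_parts_py; infer_instance

-- ===== CLAIM (what is proved, stated in full; the proofs are below) =====
def Claim_equal_clean_relative_parts_py : Prop := ∀ (raw_path : String), Dom_clean_relative_parts_py raw_path → Pre_clean_relative_parts_py raw_path → Spec_clean_relative_parts_py raw_path (clean_relative_parts_py raw_path)

-- ===== LEMMAS AND PROOFS =====

-- Simple recursive splitter on '/', used only by the proofs to mediate between
-- PySem.Chars.splitOn (A's side) and the char scan (B's side).
def pvSplit1 (pre : List Char) : List Char → List (List Char)
  | [] => [pre]
  | a :: rest => if a = '/' then pre :: pvSplit1 [] rest else pvSplit1 (pre ++ [a]) rest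

theorem pv_go_eq (fuel : Nat) : ∀ (l cur : List Char) (acc : List (List Char)),
    l.length ≤ fuel →
    PySem.Chars.splitOn.go ['/'] fuel l cur acc = acc.reverse ++ pvSplit1 cur.reverse l := by
  induction fuel with
  | zero =>
    intro l cur acc h
    have : l = [] := by simpa using List.length_eq_zero_iff.mp (Nat.le_zero.mp h)
    subst this
    simp [PySem.Chars.splitOn.go, pvSplit1]
  | succ n ih =>
    intro l cur acc h
    cases l with
    | nil => simp [PySem.Chars.splitOn.go, pvSplit1]
    | cons c rest =>
      by_cases hc : c = '/'
      · subst hc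
        rw [PySem.Chars.splitOn.go]
        simp only [List.isPrefixOf]
        simp [pvSplit1, ih rest [] _ (by simpa using Nat.le_of_succ_le_succ h)]
      · rw [PySem.Chars.splitOn.go]
        have hp : (['/'].isPrefixOf (c :: rest)) = false := by
          simp [List.isPrefixOf]; exact fun h' => absurd h'.symm hc
        simp only [hp, Bool.false_eq_true, if_false]
        rw [ih rest (c :: cur) acc (by simpa using Nat.le_of_succ_le_succ h)]
        simp [pvSplit1, hc]

theorem pv_splitOn_eq (l : List Char) :
    PySem.Chars.splitOn l ['/'] = pvSplit1 [] l := by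
  rw [PySem.Chars.splitOn, pv_go_eq (l.length + 1) l [] [] (by omega)]
  simp

theorem pv_flush_eq (out : List String) (l : List Char) :
    (if PySem.Chars.strip l = ['.', '.'] then out
     else if PySem.Chars.strip l ≠ [] ∧ PySem.Chars.strip l ≠ ['.'] then
       out ++ [String.ofList (PySem.Chars.strip l)]
     else out)
    = (if String.ofList (PySem.Chars.strip l) = "" ∨ String.ofList (PySem.Chars.strip l) = "." then out
       else if String.ofList (PySem.Chars.strip l) = ".." then out
       else out ++ [String.ofList (PySem.Chars.strip l)]) := by
  generalize PySem.Chars.strip l = p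
  have h0 : (String.ofList p = "") ↔ p = [] := String.ofList_eq_empty_iff
  have h1 : (String.ofList p = ".") ↔ p = ['.'] := by
    rw [show ("." : String) = String.ofList ['.'] from rfl]; exact String.ofList_inj
  have h2 : (String.ofList p = "..") ↔ p = ['.', '.'] := by
    rw [show (".." : String) = String.ofList ['.', '.'] from rfl]; exact String.ofList_inj
  by_cases hdd : p = ['.', '.']
  · simp [hdd]
  · rw [if_neg hdd]
    by_cases he : p = []
    · simp [he]
    · by_cases hd : p = ['.']
      · simp [hd]
      · rw [if_pos ⟨he, hd⟩, if_neg (by simp [h0, h1, he, hd]), if_neg (by simp [h2, hdd])]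

theorem pv_scan_eq (cs : List Char) : ∀ (out : List String) (seg : List Char),
    ((cs ++ ['/']).foldl
      (fun (st : List String × List Char) ch =>
        if ch = '/' then
          let part := PySem.Chars.strip st.2
          if part = ['.', '.'] then (st.1, [])
          else if part ≠ [] ∧ part ≠ ['.'] then (st.1 ++ [String.ofList part], [])
          else (st.1, [])
        else (st.1, st.2 ++ [ch])) (out, seg)).1
    = (pvSplit1 seg cs).foldl
        (fun out l =>
          if String.ofList (PySem.Chars.strip l) = "" ∨ String.ofList (PySem.Chars.strip l) = "." then out
          else if String.ofList (PySem.Chars.strip l) = ".." then out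
          else out ++ [String.ofList (PySem.Chars.strip l)]) out := by
  induction cs with
  | nil =>
    intro out seg
    simp only [List.nil_append, List.foldl_cons, List.foldl_nil, pvSplit1]
    rw [← pv_flush_eq]
    split_ifs <;> rfl
  | cons a cs ih =>
    intro out seg
    by_cases ha : a = '/'
    · subst ha
      simp only [List.cons_append, List.foldl_cons, pvSplit1, if_true]
      rw [← pv_flush_eq]
      split_ifs <;> exact ih _ []
    · simp only [List.cons_append, List.foldl_cons, pvSplit1, if_neg ha]
      exact ih out (seg ++ [a])

-- ===== VERDICT (by name: the statement is the Claim_ definition above) =====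
theorem clean_relative_parts_py_spec : Claim_equal_clean_relative_parts_py := by
  intro raw_path _ _
  simp only [Spec_clean_relative_parts_py, clean_relative_parts_py,
    clean_relative_parts_py_alt]
  split_ifs with h0 h1
  · rfl
  · rfl
  · have hsp : (PySem.Str.split?
        (PySem.Str.strip (PySem.Str.replace raw_path "\\" "/")) "/").getD []
        = (pvSplit1 [] (PySem.Str.strip (PySem.Str.replace raw_path "\\" "/")).toList).map
            String.ofList := by
      simp [PySem.Str.split?, PySem.Chars.split?, pv_splitOn_eq]
    rw [pv_scan_eq]
    rw [hsp]
    rw [List.foldl_map]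
    refine PySem.List.foldl_congr_mem _ _ _ _ (fun acc l _ => ?_)
    simp [PySem.Str.strip]
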